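-- pv_equiv track=rewrite | github.com/LorisDematini/rct_rag | PDF_Re/Acronym/new_acronym_extract_specific.py | try_hierarchical_match
-- ===== SOURCE A (Python) =====
-- import itertools
--
-- def try_hierarchical_match(acronym, words):
--     acronym = acronym.lower()
--     acro_len = len(acronym)
--
--     #Version 1 : Basique mot par mot pour lettre par lettre
--     for i in range(len(words) - acro_len + 1):
--         segment = words[i:i + acro_len]
--         if all(segment[j][0].lower() == acronym[j] for j in range(acro_len)):
--             return segment
--
--     #Version 2 : On boucle sur les mots de la window en supprimant un par un pour voir si il n'y pas des mots parasites dedans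
--     if len(words) >= acro_len:
--         indices = list(range(len(words)))
--         for combo in itertools.combinations(indices, acro_len):
--             if list(combo) != sorted(combo):
--                 continue
--             segment = [words[i] for i in combo]
--             initials = [w[0].lower() for w in segment]
--             if ''.join(initials) == acronym:
--                 return segment
--
--     #Version 3 : On boucle sur un ensemble de mots plus petits pour voir si un mot final ne comprend pas toutes les lettres restantes
--     for n in range(acro_len - 1, 0, -1):
--         for i in range(len(words) - n + 1):
--             segment = words[i:i + n]
--
--             if len(segment) < 2:
--                 continue
--
--             matched_letters = [w[0].lower() for w in segment]
--             if acronym[:n] == ''.join(matched_letters):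
--                 remaining = acronym[n:]
--                 last_word = segment[-1]
--
--                 a_idx = 0
--                 for char in last_word[1:].lower():
--                     if a_idx < len(remaining) and char == remaining[a_idx]:
--                         a_idx += 1
--
--                 if a_idx == len(remaining):
--                     return segment
--
--     #Version 4 : Définition en 1 seul mot, on boucle sur les lettres d'un mot et de l'acronyme
--     for word in reversed(words):
--         if word[0].lower() not in acronym:
--             continue
--         w_idx = 0
--         a_idx = 0
--         while w_idx < len(word) and a_idx < len(acronym):
--             if word[w_idx].lower() == acronym[a_idx]:
--                 a_idx += 1
--             w_idx += 1
--         if a_idx == len(acronym):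
--             return [word]
--
--     return None
-- ===== SOURCE B (Python) =====
-- def _is_subseq(pattern, text):
--     """True iff pattern is a subsequence of text (greedy scan)."""
--     j = 0
--     for ch in text:
--         if j < len(pattern) and ch == pattern[j]:
--             j += 1
--     return j == len(pattern)
--
--
-- def _scan(pairs, k, check):
--     """First non-None value of check(head) over the length-k heads of the
--     successive suffixes of pairs (i.e. over all contiguous windows, left to
--     right)."""
--     while len(pairs) >= k:
--         r = check(pairs[:k])
--         if r is not None:
--             return r
--         pairs = pairs[1:]
--     return None
--
--
-- def _first_subseq(pairs, target):
--     """pairs: list of (word, initial). Lexicographically first (by index tuple)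
--     subsequence of the words whose initials spell target, or None."""
--     if len(pairs) < len(target):
--         return None
--     if not target:
--         return []
--     (w, ini), rest = pairs[0], pairs[1:]
--     if ini == target[0]:
--         r = _first_subseq(rest, target[1:])
--         if r is not None:
--             return [w] + r
--     return _first_subseq(rest, target)
--
--
-- def _prefix_tail(pairs, acronym, n):
--     """Windows of length n, n-1, ..., 2 whose initials spell acronym[:n] and
--     whose last word's tail contains acronym[n:] as a subsequence."""
--     if n < 2:
--         return None
--
--     def check(head):
--         if [ini for _, ini in head] == list(acronym[:n]) and \
--            _is_subseq(acronym[n:], head[-1][0][1:].lower()):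
--             return [w for w, _ in head]
--         return None
--
--     return _scan(pairs, n, check) or _prefix_tail(pairs, acronym, n - 1)
--
--
-- def try_hierarchical_match(acronym, words):
--     acronym = acronym.lower()
--     m = len(acronym)
--     if m == 0:
--         return []
--     pairs = [(w, w[0].lower()) for w in words]
--     target = list(acronym)
--
--     def window(head):
--         return [w for w, _ in head] if [ini for _, ini in head] == target else None
--
--     # Stage 1: contiguous window whose initials spell the acronym.
--     res = _scan(pairs, m, window)
--     # Stage 2: lexicographically first (possibly non-contiguous) subsequence
--     # whose initials spell the acronym, by pruned backtracking instead of
--     # enumerating all C(n, m) index combinations.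
--     if res is None:
--         res = _first_subseq(pairs, target)
--     # Stage 3: shorter window spelling a prefix, rest in the last word's tail.
--     if res is None:
--         res = _prefix_tail(pairs, acronym, m - 1)
--     # Stage 4: a single word containing the acronym as a subsequence; one
--     # forward pass keeping the LAST match (A scans reversed for the first).
--     if res is None:
--         for w, ini in pairs:
--             if ini in acronym and _is_subseq(acronym, w.lower()):
--                 res = [w]
--     return res
-- ===== Notes on version B (the rewrite author's own statement) =====
-- stated objective: alternative
-- what changed: Stage 2 finds the lexicographically first matching subsequence by length-pruned backtracking over a precomputed (word, initial) pair list instead of enumerating all C(n,m) index combinations; the two window stages become one suffix-recursive scanner with a pluggable window check instead of index loops with slicing, and stage 4 becomes a single forward pass keeping the last match instead of a reversed find-first.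
-- outside the precondition, e.g. on try_hierarchical_match('a', ['a', '']): A returns ['a'], B raises IndexError
import Mathlib
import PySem

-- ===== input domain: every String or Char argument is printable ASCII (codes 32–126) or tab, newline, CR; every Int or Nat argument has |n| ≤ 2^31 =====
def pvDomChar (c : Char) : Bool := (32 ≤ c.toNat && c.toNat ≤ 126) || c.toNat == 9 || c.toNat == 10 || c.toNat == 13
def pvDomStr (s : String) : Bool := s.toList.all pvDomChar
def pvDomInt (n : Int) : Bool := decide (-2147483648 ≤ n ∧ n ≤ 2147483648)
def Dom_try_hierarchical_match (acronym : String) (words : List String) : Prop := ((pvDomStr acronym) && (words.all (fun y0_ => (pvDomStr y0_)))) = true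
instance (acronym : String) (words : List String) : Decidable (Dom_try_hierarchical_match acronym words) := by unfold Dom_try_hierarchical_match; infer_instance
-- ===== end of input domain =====

-- B replaces A's stage 2 (enumeration of all C(n,m) index combinations) by length-pruned
-- backtracking over a precomputed (word, initial) pair list; the window stages become
-- a single suffix-recursive scanner with a pluggable window check, and stage 4 becomes
-- one forward pass keeping the last match.  Objective: alternative (a different
-- decomposition; stage 2 never materialises the combination list).

-- ===== PORT A =====

-- w[0].lower()  (none = IndexError on the empty word; excluded by Pre_)
def pvInit (w : String) : Option Char := (PySem.Str.pyGet? w 0).map PySem.Chars.lowerChar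

-- itertools.combinations(l, k) in Python's (lexicographic-by-position) order
def pvCombos {α : Type} : List α → Nat → List (List α)
  | _, 0 => [[]]
  | [], _ + 1 => []
  | x :: xs, k + 1 => ((pvCombos xs k).map (x :: ·)) ++ pvCombos xs (k + 1)

-- V3 inner for-loop: a_idx counter over the (already lowered) chars of last_word[1:]
def pvCountLoop (t : List Char) (rem : List Char) (a : Nat) : Nat :=
  match t with
  | [] => a
  | c :: cs =>
    if a < rem.length && (PySem.List.pyGet? rem (a : Int) == some c) then
      pvCountLoop cs rem (a + 1)
    else
      pvCountLoop cs rem a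

-- V4 while-loop: stops as soon as a_idx = len(acronym); chars lowered one by one
def pvWhileLoop (t : List Char) (acr : List Char) (a : Nat) : Nat :=
  match t with
  | [] => a
  | c :: cs =>
    if a < acr.length then
      if (some (PySem.Chars.lowerChar c) == PySem.List.pyGet? acr (a : Int)) then
        pvWhileLoop cs acr (a + 1)
      else
        pvWhileLoop cs acr a
    else a

-- Version 1: contiguous windows
def pvV1A (acr : List Char) (words : List String) : Option (List String) :=
  (PySem.List.pyRange 0 ((words.length : Int) - acr.length + 1) 1).findSome? (fun i =>
    let segment := PySem.List.slice words (some i) (some (i + acr.length))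
    if (PySem.List.pyRange 0 (acr.length : Int) 1).all (fun j =>
        pvInit (PySem.List.pyGetD segment j "") == PySem.List.pyGet? acr j) then
      some segment
    else none)

-- Version 2: all index combinations (the 'combo != sorted(combo)' test kept verbatim;
-- ''.join(initials) == acronym is rendered char-wise: initials are Option Char)
def pvV2A (acr : List Char) (words : List String) : Option (List String) :=
  if (acr.length : Int) ≤ (words.length : Int) then
    (pvCombos (PySem.List.pyRange 0 ((words.length : Int)) 1) acr.length).findSome? (fun combo =>
      if ¬ (combo = PySem.List.sorted combo (fun x => x)) then none
      else
        let segment := combo.map (fun i => PySem.List.pyGetD words i "")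
        let initials := segment.map pvInit
        if initials == acr.map some then some segment else none)
  else none

-- Version 3: shorter windows, the remainder a subsequence of the last word's tail
-- (the inner i-loop is the named helper pvV3InnerA)
def pvV3InnerA (acr : List Char) (words : List String) (n : Int) : Option (List String) :=
  (PySem.List.pyRange 0 ((words.length : Int) - n + 1) 1).findSome? (fun i =>
    let segment := PySem.List.slice words (some i) (some (i + n))
    if segment.length < 2 then none
    else
      let matchedLetters := segment.map pvInit
      if (PySem.List.slice acr none (some n)).map some == matchedLetters then
        let remaining := PySem.List.slice acr (some n) none
        let lastWord := PySem.List.pyGetD segment (-1) ""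
        let aIdx := pvCountLoop (PySem.Chars.lower (PySem.List.slice lastWord.toList (some 1) none)) remaining 0
        if aIdx == remaining.length then some segment else none
      else none)

def pvV3A (acr : List Char) (words : List String) : Option (List String) :=
  (PySem.List.pyRange ((acr.length : Int) - 1) 0 (-1)).findSome? (pvV3InnerA acr words)

-- Version 4: one word, scanned from the end
def pvV4A (acr : List Char) (words : List String) : Option (List String) :=
  words.reverse.findSome? (fun word =>
    if (match pvInit word with | some c => decide (c ∈ acr) | none => false) then
      if pvWhileLoop word.toList acr 0 == acr.length then some [word] else none
    else none)

def try_hierarchical_match (acronym : String) (words : List String) : Option (List String) :=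
  let acr := PySem.Chars.lower acronym.toList
  ((pvV1A acr words).or ((pvV2A acr words).or ((pvV3A acr words).or (pvV4A acr words))))

-- ===== PORT B =====

-- w[0].lower() via head? (none = IndexError on the empty word; excluded by Pre_)
def pvInitB (w : String) : Option Char := w.toList.head?.map PySem.Chars.lowerChar

-- _is_subseq(pattern, text)
def pvIsSubseq (pat : List Char) (t : List Char) : Bool :=
  match pat, t with
  | [], _ => true
  | _ :: _, [] => false
  | p :: ps, c :: cs => if p == c then pvIsSubseq ps cs else pvIsSubseq (p :: ps) cs

-- _scan(pairs, k, check): walk the suffixes, apply check to each length-k head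
-- (Python's while-loop exits on a short suffix; every call site has k ≥ 1)
def pvScan {β : Type} (k : Nat) (check : List (String × Option Char) → Option β) :
    List (String × Option Char) → Option β
  | [] => none
  | p :: ps =>
    if ps.length + 1 < k then none
    else ((check ((p :: ps).take k)).or (pvScan k check ps))

-- _first_subseq(pairs, target): lexicographically first subsequence spelling target,
-- pruned as soon as too few pairs remain
def pvFirstSubseq (pairs : List (String × Option Char)) (target : List Char) : Option (List String) :=
  if pairs.length < target.length then none
  else
    match target, pairs with
    | [], _ => some []
    | _ :: _, [] => none
    | c :: rest, (w, ini) :: ps =>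
      if ini == some c then
        match pvFirstSubseq ps rest with
        | some r => some (w :: r)
        | none => pvFirstSubseq ps (c :: rest)
      else pvFirstSubseq ps (c :: rest)
termination_by pairs.length

-- local 'window' check of stage 1
def pvCheckWin (acr : List Char) (head : List (String × Option Char)) : Option (List String) :=
  if head.map Prod.snd == acr.map some then some (head.map Prod.fst) else none

-- 'check' of _prefix_tail: head spells acronym[:n], acronym[n:] hides in the last word's tail
def pvCheckPref (acr : List Char) (n : Nat) (head : List (String × Option Char)) : Option (List String) :=
  if (head.map Prod.snd == (acr.take n).map some)
      && pvIsSubseq (acr.drop n)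
           (PySem.Chars.lower ((head.getLastD ("", none)).1.toList.drop 1)) then
    some (head.map Prod.fst)
  else none

-- _prefix_tail(pairs, acronym, n): window lengths n, n-1, ..., 2
def pvV3B (acr : List Char) (pairs : List (String × Option Char)) : Nat → Option (List String)
  | 0 => none
  | 1 => none
  | n + 2 => (pvScan (n + 2) (pvCheckPref acr (n + 2)) pairs).or (pvV3B acr pairs (n + 1))

-- stage 4: forward pass keeping the last match
def pvV4B (acr : List Char) : List (String × Option Char) → Option (List String) → Option (List String)
  | [], res => res
  | (w, ini) :: ps, res =>
    pvV4B acr ps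
      (if (match ini with | some c => decide (c ∈ acr) | none => false)
          && pvIsSubseq acr (PySem.Chars.lower w.toList) then some [w] else res)

def try_hierarchical_match_alt (acronym : String) (words : List String) : Option (List String) :=
  let acr := PySem.Chars.lower acronym.toList
  if acr.isEmpty then some []
  else
    let pairs := words.map (fun w => (w, pvInitB w))
    ((pvScan acr.length (pvCheckWin acr) pairs).or
      ((pvFirstSubseq pairs acr).or
        ((pvV3B acr pairs (acr.length - 1)).or (pvV4B acr pairs none))))

-- ===== PRECONDITION & SPEC =====
-- Pre_ excludes a nonempty acronym together with a words list containing the empty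
-- string: there Python A hits ''[0] (IndexError) on most control paths (and B always
-- does, building the pair list), so A's occasional early return before reaching the
-- empty word is excluded with the whole region.
def Pre_try_hierarchical_match (acronym : String) (words : List String) : Prop :=
  acronym = "" ∨ ∀ w ∈ words, w ≠ ""
instance (acronym : String) (words : List String) : Decidable (Pre_try_hierarchical_match acronym words) := by
  unfold Pre_try_hierarchical_match; infer_instance
def pvWitness_try_hierarchical_match : String × List String := ("ab", ["alpha", "beta"])
def Spec_try_hierarchical_match (acronym : String) (words : List String) (out : Option (List String)) : Prop := out = try_hierarchical_match_alt acronym words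
instance (acronym : String) (words : List String) (out : Option (List String)) : Decidable (Spec_try_hierarchical_match acronym words out) := by unfold Spec_try_hierarchical_match; infer_instance

-- ===== CLAIM (what is proved, stated in full; the proofs are below) =====
def Claim_equal_try_hierarchical_match : Prop := ∀ (acronym : String) (words : List String), Dom_try_hierarchical_match acronym words → Pre_try_hierarchical_match acronym words → Spec_try_hierarchical_match acronym words (try_hierarchical_match acronym words)

-- ===== LEMMAS AND PROOFS =====

theorem pvInit_eq (w : String) : pvInit w = pvInitB w := by
  cases h : w.toList <;> simp [pvInit, pvInitB, PySem.List.pyGet?, PySem.List.pyIdx?, h]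

-- findSome? respects pointwise-equal-on-members functions
theorem pvFindSome?_congr_mem {α β : Type} {f g : α → Option β} :
    ∀ {l : List α}, (∀ x ∈ l, f x = g x) → l.findSome? f = l.findSome? g := by
  intro l
  induction l with
  | nil => intro _; rfl
  | cons x xs ih =>
    intro h
    simp only [List.findSome?_cons, h x (by simp)]
    cases g x with
    | none => exact ih (fun y hy => h y (by simp [hy]))
    | some b => rfl

theorem pvFindSome?_option_map {α β γ : Type} (h : β → γ) (f : α → Option β) :
    ∀ (l : List α), l.findSome? (fun x => (f x).map h) = (l.findSome? f).map h := by
  intro l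
  induction l with
  | nil => rfl
  | cons x xs ih =>
    simp only [List.findSome?_cons]
    cases f x with
    | none => simpa using ih
    | some b => rfl

-- ---- the generic suffix-scan bridge: A's index loop over windows = B's pvScan ----
theorem pvScan_eq {β : Type} (f : List String → Option β)
    (check : List (String × Option Char) → Option β) (k : Nat) (hk : 1 ≤ k)
    (hfc : ∀ seg : List String, seg.length = k → f seg = check (seg.map (fun w => (w, pvInit w)))) :
    ∀ ws : List String,
      (PySem.List.pyRange 0 ((ws.length : Int) - k + 1) 1).findSome?
          (fun i => f (PySem.List.slice ws (some i) (some (i + k))))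
        = pvScan k check (ws.map (fun w => (w, pvInit w))) := by
  intro ws
  induction ws with
  | nil =>
    rw [PySem.List.pyRange_one_eq_nil (by simp; omega)]
    rfl
  | cons w ws ih =>
    simp only [List.map_cons, pvScan, List.length_map]
    by_cases hs : ws.length + 1 < k
    · rw [PySem.List.pyRange_one_eq_nil (by simp; omega), if_pos hs]
      rfl
    · rw [if_neg hs]
      rw [PySem.List.pyRange_one_cons (by simp; omega)]
      rw [List.findSome?_cons]
      have hhead : f (PySem.List.slice (w :: ws) (some 0) (some (0 + k)))
          = check (((w, pvInit w) :: ws.map (fun w => (w, pvInit w))).take k) := by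
        have h0 : PySem.List.slice (w :: ws) (some 0) (some (0 + k))
            = (w :: ws).take k := by
          rw [PySem.List.slice_toNat _ (by omega) (by omega)]
          simp
        rw [h0, hfc _ (by simp; omega)]
        rw [show ((w, pvInit w) :: List.map (fun w => (w, pvInit w)) ws)
              = List.map (fun w => (w, pvInit w)) (w :: ws) from rfl, List.map_take]
      rw [hhead]
      have htail : (PySem.List.pyRange (0 + 1) ((↑(w :: ws).length : Int) - ↑k + 1) 1).findSome?
            (fun i => f (PySem.List.slice (w :: ws) (some i) (some (i + k))))
          = (PySem.List.pyRange 0 ((ws.length : Int) - k + 1) 1).findSome?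
            (fun i => f (PySem.List.slice ws (some i) (some (i + k)))) := by
        rw [show ((0 : Int) + 1) = 1 from by norm_num]
        rw [PySem.List.pyRange_one 1, PySem.List.pyRange_one 0]
        have hlen : (((w :: ws).length : Int) - k + 1 - 1).toNat = ((ws.length : Int) - k + 1 - 0).toNat := by
          simp; omega
        rw [hlen, List.findSome?_map, List.findSome?_map]
        apply pvFindSome?_congr_mem
        intro j hj
        simp only [Function.comp]
        congr 1
        rw [PySem.List.slice_toNat _ (by omega) (by omega),
            PySem.List.slice_toNat _ (by omega) (by omega)]
        have e1 : ((1 : Int) + j).toNat = j + 1 := by omega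
        have e2 : ((1 : Int) + j + k).toNat = j + 1 + k := by omega
        have e3 : ((0 : Int) + j).toNat = j := by omega
        have e4 : ((0 : Int) + j + k).toNat = j + k := by omega
        rw [e1, e2, e3, e4]
        simp [List.drop_succ_cons]
      rw [htail, ih]
      cases check (((w, pvInit w) :: ws.map (fun w => (w, pvInit w))).take k) <;> simp

-- members of pvCombos are sublists
theorem pvCombos_sublist {α : Type} :
    ∀ (l : List α) (k : Nat) (c : List α), c ∈ pvCombos l k → c.Sublist l := by
  intro l
  induction l with
  | nil => intro k c hc; cases k <;> simp_all [pvCombos]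
  | cons x xs ih =>
    intro k c hc
    cases k with
    | zero => simp [pvCombos] at hc; simp [hc]
    | succ k =>
      simp only [pvCombos, List.mem_append, List.mem_map] at hc
      rcases hc with ⟨d, hd, rfl⟩ | hc
      · exact (ih k d hd).cons₂ x
      · exact (ih (k+1) c hc).cons x

theorem pvCombos_map {α β : Type} (f : α → β) :
    ∀ (l : List α) (k : Nat), pvCombos (l.map f) k = (pvCombos l k).map (List.map f) := by
  intro l
  induction l with
  | nil => intro k; cases k <;> simp [pvCombos]
  | cons x xs ih =>
    intro k
    cases k with
    | zero => simp [pvCombos]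
    | succ k => simp [pvCombos, ih, Function.comp_def]

-- the unguarded backtracking recursion (proof-side reference form of _first_subseq)
def pvFS0 (pairs : List (String × Option Char)) (target : List Char) : Option (List String) :=
  match target with
  | [] => some []
  | c :: rest =>
    match pairs with
    | [] => none
    | (w, ini) :: ps =>
      if ini == some c then
        match pvFS0 ps rest with
        | some r => some (w :: r)
        | none => pvFS0 ps (c :: rest)
      else pvFS0 ps (c :: rest)

theorem pvFS0_none_of_short :
    ∀ (pairs : List (String × Option Char)) (cs : List Char),
      pairs.length < cs.length → pvFS0 pairs cs = none := by
  intro pairs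
  induction pairs with
  | nil => intro cs h; cases cs with
    | nil => simp at h
    | cons c cs => rfl
  | cons p ps ih =>
    intro cs h
    cases cs with
    | nil => simp at h
    | cons c cs =>
      obtain ⟨w, ini⟩ := p
      simp only [pvFS0]
      have h1 : pvFS0 ps cs = none := ih cs (by simp at h ⊢; omega)
      have h2 : pvFS0 ps (c :: cs) = none := ih (c :: cs) (by simp at h ⊢; omega)
      rw [h1, h2]
      split <;> rfl

-- the length guard only prunes branches the recursion would have failed on anyway
theorem pvFirstSubseq_eq :
    ∀ (pairs : List (String × Option Char)) (target : List Char),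
      pvFirstSubseq pairs target = pvFS0 pairs target := by
  intro pairs
  induction pairs with
  | nil =>
    intro target
    cases target with
    | nil => simp [pvFirstSubseq, pvFS0]
    | cons c cs => simp [pvFirstSubseq, pvFS0]
  | cons p ps ih =>
    intro target
    obtain ⟨w, ini⟩ := p
    cases target with
    | nil => simp [pvFirstSubseq, pvFS0]
    | cons c cs =>
      by_cases hg : ((w, ini) :: ps).length < (c :: cs).length
      · rw [pvFirstSubseq, if_pos hg]
        exact (pvFS0_none_of_short _ _ hg).symm
      · rw [pvFirstSubseq, if_neg hg]
        simp only [pvFS0, ih]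

theorem pvCombos_find_eq_firstSubseq :
    ∀ (ws : List String) (cs : List Char),
      (pvCombos ws cs.length).findSome?
          (fun seg => if seg.map pvInit == cs.map some then some seg else none)
        = pvFS0 (ws.map (fun w => (w, pvInit w))) cs := by
  intro ws
  induction ws with
  | nil =>
    intro cs
    cases cs with
    | nil => simp [pvCombos, pvFS0]
    | cons c cs => simp [pvCombos, pvFS0]
  | cons w ws ih =>
    intro cs
    cases cs with
    | nil => simp [pvCombos, pvFS0]
    | cons c cs =>
      simp only [List.length_cons, pvCombos, List.findSome?_append, List.findSome?_map]
      by_cases hw : pvInit w = some c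
      · have h1 : (List.findSome? ((fun seg => if (List.map pvInit seg == List.map some (c :: cs)) then some seg else none) ∘ (w :: ·)) (pvCombos ws cs.length))
            = ((pvCombos ws cs.length).findSome? (fun seg => if seg.map pvInit == cs.map some then some seg else none)).map (w :: ·) := by
          have e : ((fun seg => if (List.map pvInit seg == List.map some (c :: cs)) then some seg else none) ∘ (w :: ·))
              = fun seg => (if (List.map pvInit seg == List.map some cs) then some seg else none).map (w :: ·) := by
            funext seg
            by_cases hs : List.map pvInit seg = List.map some cs <;>
              simp [Function.comp, hw, hs]
          rw [e, pvFindSome?_option_map]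
        have ih2 := ih (c :: cs)
        simp only [List.length_cons] at ih2
        rw [h1, ih cs, ih2]
        simp only [List.map_cons, pvFS0, hw, beq_self_eq_true, if_true]
        cases pvFS0 (ws.map fun w => (w, pvInit w)) cs <;> simp
      · have h1 : (List.findSome? ((fun seg => if (List.map pvInit seg == List.map some (c :: cs)) then some seg else none) ∘ (w :: ·)) (pvCombos ws cs.length)) = none := by
          apply List.findSome?_eq_none_iff.mpr
          intro seg _
          simp [Function.comp, hw]
        have ih2 := ih (c :: cs)
        simp only [List.length_cons] at ih2
        rw [h1, ih2]
        have hb : (pvInit w == some c) = false := by simp [hw]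
        simp [pvFS0, hb]

theorem pvCountLoop_run_out (rem : List Char) :
    ∀ (t : List Char), pvCountLoop t rem rem.length = rem.length := by
  intro t
  induction t with
  | nil => rfl
  | cons c cs ih => simp [pvCountLoop, ih]

theorem pvCountLoop_eq_isSubseq (rem : List Char) :
    ∀ (t : List Char) (a : Nat), a ≤ rem.length →
      ((pvCountLoop t rem a == rem.length) = pvIsSubseq (rem.drop a) t) := by
  intro t
  induction t with
  | nil =>
    intro a ha
    have hlen : (rem.drop a).length = rem.length - a := List.length_drop
    cases h : rem.drop a with
    | nil =>
      have : a = rem.length := by rw [h] at hlen; simp at hlen; omega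
      simp [pvIsSubseq, pvCountLoop, this]
    | cons d ds =>
      have : a ≠ rem.length := by
        intro e; rw [e, List.drop_length] at h; cases h
      simp [pvIsSubseq, pvCountLoop, this]
  | cons c cs ih =>
    intro a ha
    by_cases hlt : a < rem.length
    · have hget : PySem.List.pyGet? rem (a : Int) = some rem[a] := by
        simp [PySem.List.pyGet?_natCast, List.getElem?_eq_getElem hlt]
      have hdrop : rem.drop a = rem[a] :: rem.drop (a + 1) := List.drop_eq_getElem_cons hlt
      by_cases hc : rem[a] = c
      · simp only [pvCountLoop, hget, hlt, hc, beq_self_eq_true, decide_true, Bool.and_self, if_true]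
        rw [ih (a+1) hlt, hdrop, hc]
        simp [pvIsSubseq]
      · simp only [pvCountLoop, hget, hlt, decide_true, Bool.true_and]
        rw [if_neg (by simp [hc])]
        rw [ih a ha, hdrop]
        cases hcs : rem.drop (a+1) <;> simp [pvIsSubseq, hc]
    · have ha' : a = rem.length := by omega
      subst ha'
      rw [pvCountLoop_run_out]
      simp [List.drop_length, pvIsSubseq]

theorem pvWhileLoop_eq_isSubseq (acr : List Char) :
    ∀ (t : List Char) (a : Nat), a ≤ acr.length →
      ((pvWhileLoop t acr a == acr.length) = pvIsSubseq (acr.drop a) (t.map PySem.Chars.lowerChar)) := by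
  intro t
  induction t with
  | nil =>
    intro a ha
    have hlen : (acr.drop a).length = acr.length - a := List.length_drop
    cases h : acr.drop a with
    | nil =>
      have : a = acr.length := by rw [h] at hlen; simp at hlen; omega
      simp [pvIsSubseq, pvWhileLoop, this]
    | cons d ds =>
      have : a ≠ acr.length := by
        intro e; rw [e, List.drop_length] at h; cases h
      simp [pvIsSubseq, pvWhileLoop, this]
  | cons c cs ih =>
    intro a ha
    by_cases hlt : a < acr.length
    · have hget : PySem.List.pyGet? acr (a : Int) = some acr[a] := by
        simp [PySem.List.pyGet?_natCast, List.getElem?_eq_getElem hlt]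
      have hdrop : acr.drop a = acr[a] :: acr.drop (a + 1) := List.drop_eq_getElem_cons hlt
      by_cases hc : acr[a] = PySem.Chars.lowerChar c
      · simp only [pvWhileLoop, hget, hlt, if_true, hc, beq_self_eq_true]
        rw [ih (a+1) hlt, hdrop, hc]
        simp [pvIsSubseq]
      · simp only [pvWhileLoop, hget, hlt, if_true]
        rw [if_neg (by simp; exact fun h => hc h.symm), ih a ha, hdrop]
        cases hcs : acr.drop (a+1) <;> simp [pvIsSubseq, hc]
    · have ha' : a = acr.length := by omega
      subst ha'
      simp [pvWhileLoop, pvIsSubseq, List.drop_length]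

theorem pvAllIdx_eq_mapEq :
    ∀ (cs : List Char) (seg : List String), seg.length = cs.length →
      ((List.range cs.length).all (fun j => pvInit (seg.getD j "") == cs[j]?)
        = (seg.map pvInit == cs.map some)) := by
  intro cs
  induction cs with
  | nil =>
    intro seg h
    have : seg = [] := List.length_eq_zero_iff.mp h
    simp [this]
  | cons c cs ih =>
    intro seg h
    cases seg with
    | nil => simp at h
    | cons s seg =>
      have hlen : seg.length = cs.length := by simpa using h
      simp only [List.length_cons]
      rw [List.range_succ_eq_map]
      simp only [List.all_cons, List.all_map]
      by_cases h0 : pvInit s = some c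
      · have := ih seg hlen
        simp only [List.getD_cons_zero, List.getElem?_cons_zero, Function.comp_def,
          List.getD_cons_succ, List.getElem?_cons_succ, List.map_cons]
        rw [show (fun j => pvInit (seg.getD j "") == cs[j]?) = fun j => pvInit (seg.getD j "") == cs[j]? from rfl] at this
        simp [h0, ← this]
      · have hb : (pvInit s == some c) = false := by simp [h0]
        simp [hb]

-- stage 1: A's window check on a length-m segment = pvCheckWin on its pair image
theorem pvWin_check_eq (acr : List Char) (seg : List String) (hlen : seg.length = acr.length) :
    (if (PySem.List.pyRange 0 (acr.length : Int) 1).all (fun j =>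
        pvInit (PySem.List.pyGetD seg j "") == PySem.List.pyGet? acr j) then some seg else none)
      = pvCheckWin acr (seg.map (fun w => (w, pvInit w))) := by
  have hcond : ((PySem.List.pyRange 0 (acr.length : Int) 1).all fun j =>
      pvInit (PySem.List.pyGetD seg j "") == PySem.List.pyGet? acr j)
      = (seg.map pvInit == acr.map some) := by
    rw [← pvAllIdx_eq_mapEq acr seg hlen, PySem.List.pyRange_one]
    simp only [List.all_map, Function.comp_def]
    have h2 : ((acr.length : Int) - 0).toNat = acr.length := by omega
    rw [h2]
    exact List.all_congr rfl (fun j => by simp [PySem.List.pyGetD_natCast])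
  rw [hcond]
  unfold pvCheckWin
  simp only [List.map_map]
  have hsnd : seg.map (Prod.snd ∘ (fun w => (w, pvInit w))) = seg.map pvInit := rfl
  have hfst : seg.map (Prod.fst ∘ (fun w => (w, pvInit w))) = seg := by
    rw [show (Prod.fst ∘ (fun w : String => (w, pvInit w))) = id from rfl, List.map_id]
  rw [hsnd, hfst]

theorem pvV1_eq (acr : List Char) (words : List String) (hk : 1 ≤ acr.length) :
    pvV1A acr words = pvScan acr.length (pvCheckWin acr) (words.map (fun w => (w, pvInit w))) := by
  unfold pvV1A
  exact pvScan_eq _ _ acr.length hk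
    (fun seg hlen => pvWin_check_eq acr seg hlen) words

theorem pvV2_eq (acr : List Char) (words : List String) :
    pvV2A acr words = pvFirstSubseq (words.map (fun w => (w, pvInit w))) acr := by
  unfold pvV2A
  by_cases hg : (acr.length : Int) ≤ (words.length : Int)
  · rw [if_pos hg]
    have hstep1 : (pvCombos (PySem.List.pyRange 0 ((words.length : Int)) 1) acr.length).findSome? (fun combo =>
        if ¬ (combo = PySem.List.sorted combo (fun x => x)) then none
        else
          let segment := combo.map (fun i => PySem.List.pyGetD words i "")
          let initials := segment.map pvInit
          if initials == acr.map some then some segment else none)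
      = (pvCombos (PySem.List.pyRange 0 ((words.length : Int)) 1) acr.length).findSome?
          ((fun seg => if seg.map pvInit == acr.map some then some seg else none)
            ∘ (List.map (fun i => PySem.List.pyGetD words i ""))) := by
      apply pvFindSome?_congr_mem
      intro combo hmem
      have hsub := pvCombos_sublist _ _ _ hmem
      have hpw : combo.Pairwise (· < ·) :=
        (PySem.List.pairwise_lt_pyRange_one 0 _).sublist hsub
      have hsorted : PySem.List.sorted combo (fun x => x) = combo :=
        PySem.List.sorted_eq_of_perm_of_pairwise_lt _ _ _ (List.Perm.refl _) hpw
      simp [hsorted, Function.comp]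
    rw [hstep1, ← List.findSome?_map, ← pvCombos_map, PySem.List.map_pyGetD_pyRange_zero']
    exact (pvCombos_find_eq_firstSubseq words acr).trans (pvFirstSubseq_eq _ _).symm
  · rw [if_neg hg]
    have hlt : words.length < acr.length := by omega
    symm
    rw [pvFirstSubseq_eq]
    apply pvFS0_none_of_short
    simpa using hlt

theorem pvV3InnerA_one (acr : List Char) (words : List String) :
    pvV3InnerA acr words 1 = none := by
  unfold pvV3InnerA
  apply List.findSome?_eq_none_iff.mpr
  intro i hi
  rw [PySem.List.mem_pyRange_one] at hi
  have h2 : (PySem.List.slice words (some i) (some (i + 1))).length < 2 := by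
    rw [PySem.List.length_slice]
    unfold PySem.List.clampIdx
    rw [if_neg (by omega), if_neg (by omega)]
    omega
  simp only [h2, if_true]

-- stage 3: A's window check on a length-n segment (n ≥ 2) = pvCheckPref on its pair image
theorem pvPref_check_eq (acr : List Char) (n : Nat) (hn : 2 ≤ n)
    (seg : List String) (hlen : seg.length = n) :
    (if seg.length < 2 then none
     else
      if (PySem.List.slice acr none (some (n : Int))).map some == seg.map pvInit then
        if pvCountLoop
            (PySem.Chars.lower (PySem.List.slice (PySem.List.pyGetD seg (-1) "").toList (some 1) none))
            (PySem.List.slice acr (some (n : Int)) none) 0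
          == (PySem.List.slice acr (some (n : Int)) none).length then some seg else none
      else none)
      = pvCheckPref acr n (seg.map (fun w => (w, pvInit w))) := by
  have hne : seg ≠ [] := by intro h; rw [h] at hlen; simp at hlen; omega
  rw [if_neg (by omega)]
  unfold pvCheckPref
  have hto : PySem.List.slice acr none (some (n : Int)) = acr.take n :=
    PySem.List.slice_to_natCast acr n
  have hfrom : PySem.List.slice acr (some (n : Int)) none = acr.drop n :=
    PySem.List.slice_from_natCast acr n
  have hlast : (((seg.map (fun w => (w, pvInit w))).getLastD ("", none)).1)
      = PySem.List.pyGetD seg (-1) "" := by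
    rw [PySem.List.pyGetD_neg_one seg "" hne]
    rw [List.getLastD_eq_getLast?, List.getLast?_map, List.getLast?_eq_some_getLast hne]
    rfl
  have htail : PySem.List.slice (PySem.List.pyGetD seg (-1) "").toList (some 1) none
      = (PySem.List.pyGetD seg (-1) "").toList.drop 1 := by
    rw [PySem.List.slice_from_one, ← List.drop_one]
  have hcnt := pvCountLoop_eq_isSubseq (acr.drop n)
      (PySem.Chars.lower ((PySem.List.pyGetD seg (-1) "").toList.drop 1)) 0 (Nat.zero_le _)
  simp only [List.drop_zero] at hcnt
  rw [hto, hfrom, hlast, htail, ← hcnt]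
  simp only [List.map_map]
  have hsnd : seg.map (Prod.snd ∘ (fun w => (w, pvInit w))) = seg.map pvInit := rfl
  have hfst : seg.map (Prod.fst ∘ (fun w => (w, pvInit w))) = seg := by
    rw [show (Prod.fst ∘ (fun w : String => (w, pvInit w))) = id from rfl, List.map_id]
  rw [hsnd, hfst]
  generalize (pvCountLoop (PySem.Chars.lower ((PySem.List.pyGetD seg (-1) "").toList.drop 1)) (acr.drop n) 0 == (acr.drop n).length) = b2
  by_cases hx : seg.map pvInit = (acr.take n).map some
  · rw [hx]
    cases b2 <;> simp
  · have hx2 : ¬ List.take n (List.map some acr) = List.map pvInit seg := by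
      rw [← List.map_take]
      exact fun e => hx e.symm
    have hx3 : ¬ List.map pvInit seg = List.take n (List.map some acr) := by
      rw [← List.map_take]
      exact hx
    simp [hx2, hx3]

theorem pvV3Inner_scan (acr : List Char) (words : List String) (n : Nat) (hn : 2 ≤ n) :
    pvV3InnerA acr words (n : Int)
      = pvScan n (pvCheckPref acr n) (words.map (fun w => (w, pvInit w))) := by
  unfold pvV3InnerA
  exact pvScan_eq _ _ n (by omega)
    (fun seg hlen => pvPref_check_eq acr n hn seg hlen) words

theorem pvV3_desc (acr : List Char) (words : List String) :
    ∀ j : Nat, (PySem.List.pyRange (j : Int) 0 (-1)).findSome? (pvV3InnerA acr words)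
      = pvV3B acr (words.map (fun w => (w, pvInit w))) j := by
  intro j
  induction j with
  | zero =>
    rw [PySem.List.pyRange_neg_one_eq_nil (by omega)]
    rfl
  | succ j ih =>
    have hcons : PySem.List.pyRange ((j + 1 : Nat) : Int) 0 (-1)
        = ((j + 1 : Nat) : Int) :: PySem.List.pyRange ((j : Nat) : Int) 0 (-1) := by
      have h : ((j + 1 : Nat) : Int) - 1 = ((j : Nat) : Int) := by push_cast; ring
      rw [PySem.List.pyRange_neg_one_cons (by push_cast; omega), h]
    rw [hcons, List.findSome?_cons]
    cases j with
    | zero =>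
      have h1 : pvV3InnerA acr words ((1 : Nat) : Int) = none := by
        exact_mod_cast pvV3InnerA_one acr words
      rw [h1]
      rw [show PySem.List.pyRange ((0 : Nat) : Int) 0 (-1) = ([] : List Int) from
        PySem.List.pyRange_neg_one_eq_nil (by norm_num)]
      simp [pvV3B]
    | succ j =>
      have h2 := pvV3Inner_scan acr words (j + 2) (by omega)
      rw [show ((j + 1 + 1 : Nat) : Int) = ((j + 2 : Nat) : Int) by push_cast; omega, h2, ih]
      rw [show pvV3B acr (words.map (fun w => (w, pvInit w))) (j + 1 + 1)
            = (pvScan (j + 2) (pvCheckPref acr (j + 2)) (words.map (fun w => (w, pvInit w)))).or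
              (pvV3B acr (words.map (fun w => (w, pvInit w))) (j + 1)) from rfl]
      cases pvScan (j + 2) (pvCheckPref acr (j + 2)) (words.map (fun w => (w, pvInit w))) <;>
        simp

theorem pvV3_eq (acr : List Char) (words : List String) (hk : 1 ≤ acr.length) :
    pvV3A acr words = pvV3B acr (words.map (fun w => (w, pvInit w))) (acr.length - 1) := by
  unfold pvV3A
  have hcast : (acr.length : Int) - 1 = ((acr.length - 1 : Nat) : Int) := by omega
  rw [hcast]
  exact pvV3_desc acr words (acr.length - 1)

-- stage 4: the reversed find-first of A as a forward keep-last fold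
theorem pvV4B_keepLast (acr : List Char) :
    ∀ (l : List String) (res : Option (List String)),
      pvV4B acr (l.map (fun w => (w, pvInit w))) res
        = (l.reverse.findSome? (fun w =>
            if (match pvInit w with | some c => decide (c ∈ acr) | none => false)
                && pvIsSubseq acr (PySem.Chars.lower w.toList) then some [w] else none)).or res := by
  intro l
  induction l with
  | nil => intro res; simp [pvV4B]
  | cons w l ih =>
    intro res
    simp only [List.map_cons, pvV4B, List.reverse_cons, List.findSome?_append]
    rw [ih]
    cases hg : (match pvInit w with | some c => decide (c ∈ acr) | none => false)
          && pvIsSubseq acr (PySem.Chars.lower w.toList)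
    · simp [List.findSome?, hg]
    · simp [List.findSome?, hg]

theorem pvV4_eq (acr : List Char) (words : List String) :
    pvV4A acr words = pvV4B acr (words.map (fun w => (w, pvInit w))) none := by
  rw [pvV4B_keepLast]
  unfold pvV4A
  rw [Option.or_none]
  apply pvFindSome?_congr_mem
  intro w _
  have hs := pvWhileLoop_eq_isSubseq acr w.toList 0 (Nat.zero_le _)
  simp only [List.drop_zero] at hs
  have hlower : PySem.Chars.lower w.toList = w.toList.map PySem.Chars.lowerChar := rfl
  rw [hlower, ← hs]
  cases hg : (match pvInit w with | some c => decide (c ∈ acr) | none => false)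
  · simp
  · cases hc : (pvWhileLoop w.toList acr 0 == acr.length) <;> simp

theorem pvA_empty (words : List String) : pvV1A [] words = some [] := by
  unfold pvV1A
  rw [PySem.List.pyRange_one_cons (by simp only [List.length_nil, Nat.cast_zero, sub_zero]; omega : (0:Int) < (words.length:Int) - (([]:List Char).length:Int) + 1)]
  rw [List.findSome?_cons]
  simp [PySem.List.slice, PySem.List.clampIdx]

-- ===== VERDICT (by name: the statement is the Claim_ definition above) =====
theorem try_hierarchical_match_spec : Claim_equal_try_hierarchical_match := by
  intro acronym words _hdom _hpre
  unfold Spec_try_hierarchical_match try_hierarchical_match try_hierarchical_match_alt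
  set acr := PySem.Chars.lower acronym.toList with hacr
  by_cases hk : acr = []
  · simp [hk, pvA_empty]
  · have hb : acr.isEmpty = false := by
      simp [hk]
    have hlen : 1 ≤ acr.length := by
      have := List.length_pos_of_ne_nil hk
      omega
    simp only [hb, Bool.false_eq_true, if_false]
    have hpairs : words.map (fun w => (w, pvInitB w)) = words.map (fun w => (w, pvInit w)) := by
      simp [pvInit_eq]
    rw [hpairs, pvV1_eq acr words hlen, pvV2_eq acr words, pvV3_eq acr words hlen, pvV4_eq acr words]
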